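-- pv_equiv track=rewrite | github.com/Kimdudcjf/Algorithm.PY | 백준/Silver/1316. 그룹 단어 체커/그룹 단어 체커.py | group_word
-- ===== SOURCE A (Python) =====
-- def group_word(word):
--     seen = set()
--     prev_char = ''
--     for char in word:
--         if char != prev_char:
--             if char in seen:
--                 return False
--             seen.add(char)
--         prev_char = char
--     return True
-- ===== SOURCE B (Python) =====
-- def group_word(word):
--     # Scan run by run: skip each maximal run, then the run's character must
--     # never occur again in the remaining suffix. No seen-set is maintained;
--     # the check looks FORWARD into the rest of the word instead of backward.
--     i = 0
--     n = len(word)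
--     while i < n:
--         c = word[i]
--         j = i + 1
--         while j < n and word[j] == c:
--             j += 1
--         if c in word[j:]:
--             return False
--         i = j
--     return True
-- ===== Notes on version B (the rewrite author's own statement) =====
-- stated objective: alternative
-- what changed: Replaces A's backward-looking streaming check against a growing seen-set by a run-by-run scan with a forward lookahead: skip each maximal run and test that its character never occurs in the remaining suffix; no set or collection of past keys is kept.
import Mathlib
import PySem

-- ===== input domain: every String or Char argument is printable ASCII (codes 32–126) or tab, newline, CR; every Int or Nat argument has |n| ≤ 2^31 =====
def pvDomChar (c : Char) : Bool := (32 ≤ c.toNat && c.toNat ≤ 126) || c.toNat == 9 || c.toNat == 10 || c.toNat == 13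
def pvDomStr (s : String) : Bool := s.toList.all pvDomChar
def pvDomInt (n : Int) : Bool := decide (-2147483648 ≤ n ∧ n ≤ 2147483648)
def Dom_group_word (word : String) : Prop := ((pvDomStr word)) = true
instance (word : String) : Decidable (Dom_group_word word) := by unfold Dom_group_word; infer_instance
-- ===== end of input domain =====

-- B replaces A's streaming seen-set check by a run-by-run scan with a forward
-- lookahead into the remaining suffix; same behaviour, similar cost (alternative).

-- ===== PORT A =====
-- A's loop with early return: state is (seen, prev_char); prev_char starts as '' which
-- equals no single character, modelled exactly by Option Char with none as the start.
def groupWordGo : List Char → PySem.Set Char → Option Char → Bool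
  | [], _, _ => true
  | c :: rest, seen, prev =>
    if some c ≠ prev then
      if PySem.Set.contains seen c then false
      else groupWordGo rest (PySem.Set.add seen c) (some c)
    else groupWordGo rest seen (some c)

def group_word (word : String) : Bool :=
  groupWordGo word.toList PySem.Set.empty none

-- ===== PORT B =====
-- Source B inner while loop 'j = i+1; while j < n and word[j] == c: j += 1':
-- on the suffix view, skip the leading run of c and return the rest (word[j:]).
def skipRun (c : Char) : List Char → List Char
  | [] => []
  | x :: xs => if x = c then skipRun c xs else x :: xs

theorem skipRun_length_le (c : Char) (l : List Char) : (skipRun c l).length ≤ l.length := by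
  induction l with
  | nil => simp [skipRun]
  | cons x xs ih =>
    simp only [skipRun]
    split
    · exact Nat.le_succ_of_le ih
    · simp

-- Source B outer while loop over the suffix word[i:]; 'c in word[j:]' is Python's
-- single-character substring test, exact as membership in the suffix.
def groupAltGo : List Char → Bool
  | [] => true
  | c :: rest =>
    let t := skipRun c rest
    if t.contains c then false else groupAltGo t
termination_by l => l.length
decreasing_by
  simpa using Nat.lt_succ_of_le (skipRun_length_le c rest)

def group_word_alt (word : String) : Bool :=
  groupAltGo word.toList

-- ===== PRECONDITION & SPEC =====
def Spec_group_word (word : String) (out : Bool) : Prop := out = group_word_alt word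
instance (word : String) (out : Bool) : Decidable (Spec_group_word word out) := by unfold Spec_group_word; infer_instance

-- ===== CLAIM (what is proved, stated in full; the proofs are below) =====
def Claim_equal_group_word : Prop := ∀ (word : String), Dom_group_word word → Spec_group_word word (group_word word)

-- ===== LEMMAS AND PROOFS =====

-- run keys of a list, given the previous character (none at the start)
def keysO : Option Char → List Char → List Char
  | _, [] => []
  | prev, c :: rest => if some c = prev then keysO prev rest else c :: keysO (some c) rest

-- A's loop computes: the run keys (after prev) are nodup and avoid seen
theorem groupWordGo_eq (cs : List Char) : ∀ (seen : PySem.Set Char) (prev : Option Char),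
    (groupWordGo cs seen prev = true ↔
      (keysO prev cs).Nodup ∧ ∀ x ∈ keysO prev cs, x ∉ seen) := by
  induction cs with
  | nil => intro seen prev; simp [groupWordGo, keysO]
  | cons c rest ih =>
    intro seen prev
    by_cases hp : some c = prev
    · subst hp
      rw [show groupWordGo (c :: rest) seen (some c) = groupWordGo rest seen (some c) by
            simp [groupWordGo],
          show keysO (some c) (c :: rest) = keysO (some c) rest by simp [keysO]]
      exact ih seen (some c)
    · rw [show keysO prev (c :: rest) = c :: keysO (some c) rest by
            simp [keysO, hp],
          show groupWordGo (c :: rest) seen prev =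
            (if PySem.Set.contains seen c then false
             else groupWordGo rest (PySem.Set.add seen c) (some c)) by
            simp [groupWordGo, hp]]
      by_cases hc : c ∈ seen
      · rw [if_pos ((PySem.Set.contains_iff _ _).mpr hc)]
        simp only [Bool.false_eq_true, false_iff, not_and]
        intro _ h
        exact absurd hc (h c (by simp))
      · rw [if_neg (by simp [hc]),
            ih (PySem.Set.add seen c) (some c)]
        simp only [List.nodup_cons, List.mem_cons]
        constructor
        · rintro ⟨hnd, h⟩
          refine ⟨⟨fun hck => (h c hck) ((PySem.Set.mem_add _ _ _).mpr (Or.inr rfl)), hnd⟩, ?_⟩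
          rintro x (rfl | hx)
          · exact hc
          · intro hxs
            exact (h x hx) ((PySem.Set.mem_add _ _ _).mpr (Or.inl hxs))
        · rintro ⟨⟨hck, hnd⟩, h⟩
          refine ⟨hnd, fun x hx hxadd => ?_⟩
          rcases (PySem.Set.mem_add _ _ _).mp hxadd with hxs | rfl
          · exact (h x (Or.inr hx)) hxs
          · exact hck hx

-- skipping a run of c changes membership only by c itself
theorem mem_cons_skipRun (c x : Char) (l : List Char) :
    x ∈ c :: skipRun c l ↔ x ∈ c :: l := by
  induction l with
  | nil => simp [skipRun]
  | cons y ys ih =>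
    by_cases hy : y = c
    · subst hy
      rw [show skipRun y (y :: ys) = skipRun y ys by simp [skipRun]]
      rw [ih]
      simp [List.mem_cons]
    · rw [show skipRun c (y :: ys) = y :: ys by simp [skipRun, hy]]

-- the run keys after c of l are the run keys (from scratch) of the suffix after c's run
theorem keysO_some_eq_skip (c : Char) (l : List Char) :
    keysO (some c) l = keysO none (skipRun c l) := by
  induction l with
  | nil => rfl
  | cons x xs ih =>
    by_cases hx : x = c
    · subst hx
      rw [show keysO (some x) (x :: xs) = keysO (some x) xs by simp [keysO],
          show skipRun x (x :: xs) = skipRun x xs by simp [skipRun]]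
      exact ih
    · rw [show keysO (some c) (x :: xs) = x :: keysO (some x) xs by simp [keysO, hx],
          show skipRun c (x :: xs) = x :: xs by simp [skipRun, hx],
          show keysO none (x :: xs) = x :: keysO (some x) xs by simp [keysO]]

-- every character of l appears among its run keys and vice versa
theorem mem_keysO_none : ∀ (l : List Char) (x : Char), x ∈ keysO none l ↔ x ∈ l
  | [], x => by simp [keysO]
  | c :: rest, x => by
    rw [show keysO none (c :: rest) = c :: keysO (some c) rest by simp [keysO],
        keysO_some_eq_skip]
    have ih := mem_keysO_none (skipRun c rest) x
    rw [← mem_cons_skipRun c x rest]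
    simp [List.mem_cons, ih]
termination_by l => l.length
decreasing_by
  simpa using Nat.lt_succ_of_le (skipRun_length_le c rest)

-- B's scan decides exactly that the run keys are pairwise distinct
theorem groupAltGo_iff : ∀ (l : List Char), groupAltGo l = true ↔ (keysO none l).Nodup
  | [] => by simp [groupAltGo, keysO]
  | c :: rest => by
    rw [show keysO none (c :: rest) = c :: keysO (some c) rest by simp [keysO],
        keysO_some_eq_skip]
    have ih := groupAltGo_iff (skipRun c rest)
    rw [show groupAltGo (c :: rest) =
          (if (skipRun c rest).contains c then false else groupAltGo (skipRun c rest)) by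
          rw [groupAltGo]]
    by_cases hc : c ∈ skipRun c rest
    · rw [if_pos (by simpa using hc)]
      simp only [Bool.false_eq_true, false_iff, List.nodup_cons, not_and]
      intro hnot
      exact absurd ((mem_keysO_none _ _).mpr hc) hnot
    · rw [if_neg (by simpa using hc), ih]
      simp only [List.nodup_cons]
      constructor
      · intro hnd
        exact ⟨fun hk => hc ((mem_keysO_none _ _).mp hk), hnd⟩
      · exact fun h => h.2
termination_by l => l.length
decreasing_by
  simpa using Nat.lt_succ_of_le (skipRun_length_le c rest)

-- ===== VERDICT (by name: the statement is the Claim_ definition above) =====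
theorem group_word_spec : Claim_equal_group_word := by
  unfold Claim_equal_group_word Spec_group_word
  intro word _
  unfold group_word group_word_alt
  rw [Bool.eq_iff_iff, groupWordGo_eq, groupAltGo_iff]
  simp [PySem.Set.empty]
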